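-- pv_equiv track=rewrite | github.com/joanroig/nitools | src/processors/kits/old/nbkt_reader.py | group_strings
-- ===== SOURCE A (Python) =====
-- def group_strings(strings):
--     """Group sequences of readable strings."""
--     grouped = []
--     block = []
--     for s in strings:
--         if any(c.isalnum() for c in s):
--             block.append(s)
--         else:
--             if block:
--                 grouped.append(block)
--                 block = []
--     if block:
--         grouped.append(block)
--     return grouped
-- ===== SOURCE B (Python) =====
-- def group_strings(strings):
--     """Group sequences of readable strings."""
--     groups = []
--     open_run = False
--     for s in reversed(strings):
--         if any(c.isalnum() for c in s):
--             if open_run: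
--                 groups[-1].append(s)
--             else:
--                 groups.append([s])
--             open_run = True
--         else:
--             open_run = False
--     return [g[::-1] for g in groups[::-1]]
-- ===== Notes on version B (the rewrite author's own statement) =====
-- stated objective: alternative
-- what changed: Builds the output back-to-front: traverses the list in reverse with an open-run flag, extending the most recent group in place instead of accumulating a pending block and flushing it at run boundaries, then reverses the group list and each group.
import Mathlib
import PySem

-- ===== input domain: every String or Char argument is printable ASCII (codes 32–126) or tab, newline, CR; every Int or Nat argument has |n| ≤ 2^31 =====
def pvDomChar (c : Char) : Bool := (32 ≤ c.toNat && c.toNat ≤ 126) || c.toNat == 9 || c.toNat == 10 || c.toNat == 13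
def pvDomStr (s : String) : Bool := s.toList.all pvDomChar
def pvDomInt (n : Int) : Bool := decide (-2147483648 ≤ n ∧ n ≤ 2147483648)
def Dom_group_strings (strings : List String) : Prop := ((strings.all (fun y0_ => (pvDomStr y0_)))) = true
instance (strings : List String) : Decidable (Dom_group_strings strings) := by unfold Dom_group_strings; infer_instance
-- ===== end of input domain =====

-- B builds the output back-to-front (reverse traversal, extend-last-group, final double reversal)
-- instead of A's forward pending-block-and-flush loop; return values proved equal on Dom.

-- shared predicate: Python's `any(c.isalnum() for c in s)` (exact on the ASCII domain via PySem.Chars.isalnum)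
def pvReadable (s : String) : Bool := s.toList.any (fun c => PySem.Chars.isalnum c)

-- ===== PORT A =====
-- the for-loop over `strings` with state (grouped, block), then the final flush
def group_strings_loop : List String → List (List String) → List String → List (List String)
  | [], grouped, block => if block.isEmpty then grouped else grouped ++ [block]
  | s :: rest, grouped, block =>
    if pvReadable s then group_strings_loop rest grouped (block ++ [s])
    else if block.isEmpty then group_strings_loop rest grouped []
    else group_strings_loop rest (grouped ++ [block]) []

def group_strings (strings : List String) : List (List String) :=
  group_strings_loop strings [] []

-- ===== PORT B =====
-- the loop body of `for s in reversed(strings)` with state (groups, open_run);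
-- `groups[-1].append(s)` appends to the last group (in range whenever open_run is true)
def group_strings_alt_step (acc : List (List String) × Bool) (s : String) :
    List (List String) × Bool :=
  if pvReadable s then
    (if acc.2 then acc.1.dropLast ++ [acc.1.getLastD [] ++ [s]] else acc.1 ++ [[s]], true)
  else (acc.1, false)

-- `for s in reversed(strings)` = foldl over strings.reverse; the final
-- `[g[::-1] for g in groups[::-1]]` is ported with List.reverse ([::-1] is exactly reversal)
def group_strings_alt (strings : List String) : List (List String) :=
  let st := strings.reverse.foldl group_strings_alt_step ([], false)
  (st.1.reverse).map List.reverse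

-- ===== PRECONDITION & SPEC =====
def Spec_group_strings (strings : List String) (out : List (List String)) : Prop := out = group_strings_alt strings
instance (strings : List String) (out : List (List String)) : Decidable (Spec_group_strings strings out) := by unfold Spec_group_strings; infer_instance

-- ===== CLAIM (what is proved, stated in full; the proofs are below) =====
def Claim_equal_group_strings : Prop := ∀ (strings : List String), Dom_group_strings strings → Spec_group_strings strings (group_strings strings)

-- ===== LEMMAS AND PROOFS =====

-- proof-side canonical form: the maximal readable runs, by span recursion
def spanGroups : List String → List (List String)
  | [] => []
  | s :: rest =>
    if pvReadable s then
      let p := List.span pvReadable rest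
      (s :: p.1) :: spanGroups p.2
    else spanGroups rest
termination_by l => l.length
decreasing_by
  · simpa [List.span_eq_takeWhile_dropWhile] using
      Nat.lt_succ_of_le (List.length_dropWhile_le pvReadable rest)
  · simp

-- A-side: the loop equals spanGroups
theorem loop_grouped (t : List String) : ∀ (grouped : List (List String)) (block : List String),
    group_strings_loop t grouped block = grouped ++ group_strings_loop t [] block := by
  induction t with
  | nil =>
    intro g b
    by_cases h : b.isEmpty
    · rw [group_strings_loop, group_strings_loop, if_pos h, if_pos h]; simp
    · rw [group_strings_loop, group_strings_loop, if_neg h, if_neg h]; simp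
  | cons s rest ih =>
    intro g b
    by_cases hs : pvReadable s
    · rw [group_strings_loop, group_strings_loop, if_pos hs, if_pos hs, ih g (b ++ [s])]
    · by_cases hb : b.isEmpty
      · rw [group_strings_loop, group_strings_loop, if_neg hs, if_neg hs, if_pos hb, if_pos hb,
          ih g []]
      · rw [group_strings_loop, group_strings_loop, if_neg hs, if_neg hs, if_neg hb, if_neg hb,
          ih (g ++ [b]) [], ih ([] ++ [b]) []]
        simp

theorem loop_span (t : List String) : ∀ (block : List String),
    group_strings_loop t [] block =
      (if block.isEmpty then [] else [block ++ t.takeWhile pvReadable]) ++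
        spanGroups (if block.isEmpty then t else t.dropWhile pvReadable) := by
  induction t with
  | nil => intro b; by_cases hb : b.isEmpty <;> simp [group_strings_loop, spanGroups, hb]
  | cons s rest ih =>
    intro b
    by_cases hs : pvReadable s
    · by_cases hb : b.isEmpty
      · have hb' : b = [] := by simpa [List.isEmpty_iff] using hb
        subst hb'
        simp [group_strings_loop, hs, ih [s], spanGroups, List.span_eq_takeWhile_dropWhile]
      · simp [group_strings_loop, hs, hb, ih (b ++ [s])]
    · by_cases hb : b.isEmpty
      · simp [group_strings_loop, hs, hb, ih [], spanGroups]
      · simp [group_strings_loop, hs, hb, loop_grouped rest [b] [], ih [], spanGroups]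

theorem a_eq_span (l : List String) : group_strings l = spanGroups l := by
  simpa [group_strings] using loop_span l []

-- B-side: the folded state, characterized over the original list via foldr
theorem alt_state (l : List String) :
    l.foldr (fun s acc => group_strings_alt_step acc s) ([], false) =
      (((spanGroups l).map List.reverse).reverse,
        match l with | [] => false | s :: _ => pvReadable s) := by
  induction l with
  | nil => simp [spanGroups]
  | cons s t ih =>
    rw [List.foldr_cons, ih]
    by_cases hs : pvReadable s
    · cases t with
      | nil =>
        simp [group_strings_alt_step, hs, spanGroups]
      | cons r t' =>
        by_cases hr : pvReadable r <;>
          simp [group_strings_alt_step, hs, hr, spanGroups, List.span_eq_takeWhile_dropWhile]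
    · rw [spanGroups, if_neg hs]
      simp [group_strings_alt_step, hs]

theorem b_eq_span (l : List String) : group_strings_alt l = spanGroups l := by
  have h := alt_state l
  simp only [group_strings_alt, List.foldl_reverse, h]
  simp [List.map_map]

-- ===== VERDICT (by name: the statement is the Claim_ definition above) =====
theorem group_strings_spec : Claim_equal_group_strings := by
  intro strings _
  show group_strings strings = group_strings_alt strings
  rw [a_eq_span, b_eq_span]
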